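-- pv_equiv track=rewrite | github.com/iskender9961/IAC2026-RVD-TUMBLING | IAC2026_ReachabilityAwareGuidance/IAC/animate.py | _edges_from_faces
-- ===== SOURCE A (Python) =====
-- def _edges_from_faces(faces_idx: list[list[int]]) -> list[tuple[int, int]]:
--     edges: set[tuple[int, int]] = set()
--     for face in faces_idx:
--         n_face = len(face)
--         for i in range(n_face):
--             a = int(face[i])
--             b = int(face[(i + 1) % n_face])
--             edges.add((a, b) if a < b else (b, a))
--     return sorted(edges)
-- ===== SOURCE B (Python) =====
-- def _merge_union(xs: list[tuple[int, int]], ys: list[tuple[int, int]]) -> list[tuple[int, int]]: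
--     # two-pointer union of two strictly increasing lists
--     i = 0
--     j = 0
--     out: list[tuple[int, int]] = []
--     while i < len(xs) and j < len(ys):
--         if xs[i] < ys[j]:
--             out.append(xs[i])
--             i += 1
--         elif ys[j] < xs[i]:
--             out.append(ys[j])
--             j += 1
--         else:
--             out.append(xs[i])
--             i += 1
--             j += 1
--     out.extend(xs[i:])
--     out.extend(ys[j:])
--     return out
--
--
-- def _union_all(runs: list[list[tuple[int, int]]]) -> list[tuple[int, int]]:
--     # divide-and-conquer merge union of strictly increasing runs
--     if not runs:
--         return []
--     if len(runs) == 1: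
--         return runs[0]
--     mid = len(runs) // 2
--     return _merge_union(_union_all(runs[:mid]), _union_all(runs[mid:]))
--
--
-- def _edges_from_faces(faces_idx: list[list[int]]) -> list[tuple[int, int]]:
--     runs: list[list[tuple[int, int]]] = []
--     for face in faces_idx:
--         n_face = len(face)
--         for i in range(n_face):
--             a = int(face[i])
--             b = int(face[(i + 1) % n_face])
--             e = (a, b) if a < b else (b, a)
--             runs.append([e])
--     return _union_all(runs)
-- ===== Notes on version B (the rewrite author's own statement) =====
-- stated objective: alternative
-- what changed: B builds no set and calls no sort: it collects each normalized edge as a singleton run and computes the answer by divide-and-conquer two-pointer merge union of the runs (mergesort-style union with duplicate elimination), so the output is sorted and duplicate-free by construction.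
import Mathlib
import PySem

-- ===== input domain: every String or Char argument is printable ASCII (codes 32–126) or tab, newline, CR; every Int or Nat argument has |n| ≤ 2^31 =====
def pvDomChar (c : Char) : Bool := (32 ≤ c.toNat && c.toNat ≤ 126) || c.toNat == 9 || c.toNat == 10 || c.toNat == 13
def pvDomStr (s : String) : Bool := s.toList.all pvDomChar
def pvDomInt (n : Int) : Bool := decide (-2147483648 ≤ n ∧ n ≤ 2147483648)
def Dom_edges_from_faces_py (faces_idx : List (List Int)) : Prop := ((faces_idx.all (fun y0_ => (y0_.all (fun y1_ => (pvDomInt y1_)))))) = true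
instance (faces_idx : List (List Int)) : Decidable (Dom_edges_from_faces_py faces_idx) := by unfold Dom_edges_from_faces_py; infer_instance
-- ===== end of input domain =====

-- B uses no set and no sort call: it collects every normalized edge as a singleton run
-- and combines the runs by divide-and-conquer two-pointer merge union, so the result is
-- already sorted and duplicate-free when the recursion ends; alternative algorithm,
-- same return value.

-- ===== PORT A =====
-- the normalized edge (min(a,b), max(a,b)) at position i of a face (the same sub-expression in both Pythons)
def pvEdge (face : List Int) (i : Int) : Int × Int :=
  let a := PySem.List.pyGetD face i 0
  let b := PySem.List.pyGetD face (PySem.Int.mod (i + 1) (face.length : Int)) 0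
  if a < b then (a, b) else (b, a)

def edges_from_faces_py (faces_idx : List (List Int)) : List (Int × Int) :=
  let edges : PySem.Set (Int × Int) :=
    faces_idx.foldl
      (fun edges face =>
        (PySem.List.pyRange 0 (face.length : Int) 1).foldl
          (fun edges i => PySem.Set.add edges (pvEdge face i)) edges)
      PySem.Set.empty
  PySem.List.sorted2 edges Prod.fst Prod.snd

-- ===== PORT B =====
-- Python tuple comparison xs[i] < ys[j] on int pairs
def pvLtB (x e : Int × Int) : Bool :=
  decide (x.1 < e.1) || (decide (x.1 = e.1) && decide (x.2 < e.2))

-- the two-pointer while loop of _merge_union (advancing a pointer = recursing on that list)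
def pvMergeUnion : List (Int × Int) → List (Int × Int) → List (Int × Int)
  | [], ys => ys
  | x :: xs, [] => x :: xs
  | x :: xs, y :: ys =>
      if pvLtB x y then x :: pvMergeUnion xs (y :: ys)
      else if pvLtB y x then y :: pvMergeUnion (x :: xs) ys
      else x :: pvMergeUnion xs ys
  termination_by xs ys => xs.length + ys.length

-- runs[:mid] / runs[mid:] with mid = len(runs)//2, as take/drop (used for termination)
theorem pv_slice_take (runs : List (List (Int × Int))) :
    PySem.List.slice runs none (some (PySem.Int.floordiv (runs.length : Int) 2)) = runs.take (runs.length / 2) := by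
  have h : PySem.Int.floordiv ((runs.length : Nat) : Int) 2 = (((runs.length : Nat) / 2 : Nat) : Int) := by
    simp [PySem.Int.floordiv, Int.fdiv_eq_ediv]
  rw [h, PySem.List.slice_to_natCast]

theorem pv_slice_drop (runs : List (List (Int × Int))) :
    PySem.List.slice runs (some (PySem.Int.floordiv (runs.length : Int) 2)) none = runs.drop (runs.length / 2) := by
  have h : PySem.Int.floordiv ((runs.length : Nat) : Int) 2 = (((runs.length : Nat) / 2 : Nat) : Int) := by
    simp [PySem.Int.floordiv, Int.fdiv_eq_ediv]
  rw [h, PySem.List.slice_from_natCast]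

-- _union_all: divide-and-conquer merge union of the runs
def pvUnionAll (runs : List (List (Int × Int))) : List (Int × Int) :=
  if runs.length = 0 then []
  else if runs.length = 1 then PySem.List.pyGetD runs 0 []
  else
    let mid := PySem.Int.floordiv (runs.length : Int) 2
    pvMergeUnion (pvUnionAll (PySem.List.slice runs none (some mid)))
                 (pvUnionAll (PySem.List.slice runs (some mid) none))
  termination_by runs.length
  decreasing_by
  · rw [pv_slice_take]; simp only [List.length_take]; omega
  · rw [pv_slice_drop]; simp only [List.length_drop]; omega

def edges_from_faces_py_alt (faces_idx : List (List Int)) : List (Int × Int) :=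
  let runs : List (List (Int × Int)) :=
    faces_idx.foldl
      (fun runs face =>
        (PySem.List.pyRange 0 (face.length : Int) 1).foldl
          (fun runs i => runs ++ [[pvEdge face i]]) runs)
      []
  pvUnionAll runs

-- ===== PRECONDITION & SPEC =====
def Spec_edges_from_faces_py (faces_idx : List (List Int)) (out : List (Int × Int)) : Prop := out = edges_from_faces_py_alt faces_idx
instance (faces_idx : List (List Int)) (out : List (Int × Int)) : Decidable (Spec_edges_from_faces_py faces_idx out) := by unfold Spec_edges_from_faces_py; infer_instance

-- ===== CLAIM (what is proved, stated in full; the proofs are below) =====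
def Claim_equal_edges_from_faces_py : Prop := ∀ (faces_idx : List (List Int)), Dom_edges_from_faces_py faces_idx → Spec_edges_from_faces_py faces_idx (edges_from_faces_py faces_idx)

-- ===== LEMMAS AND PROOFS =====

-- Python's lexicographic tuple order on Int × Int
def pvLexLe (a b : Int × Int) : Prop := a.1 < b.1 ∨ (a.1 = b.1 ∧ a.2 ≤ b.2)
def pvLexLt (a b : Int × Int) : Prop := a.1 < b.1 ∨ (a.1 = b.1 ∧ a.2 < b.2)

theorem pvLtB_iff {a b : Int × Int} : pvLtB a b = true ↔ pvLexLt a b := by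
  simp [pvLtB, pvLexLt]

theorem pvLexLt_le {a b : Int × Int} (h : pvLexLt a b) : pvLexLe a b := by
  rcases h with h | ⟨h1, h2⟩
  · exact Or.inl h
  · exact Or.inr ⟨h1, le_of_lt h2⟩

theorem pvLexLt_ne {a b : Int × Int} (h : pvLexLt a b) : a ≠ b := by
  rintro rfl
  rcases h with h | ⟨_, h⟩ <;> exact lt_irrefl _ h

theorem pvLex_eq_of_not_lt {a b : Int × Int} (h1 : ¬ pvLexLt a b) (h2 : ¬ pvLexLt b a) : a = b := by
  unfold pvLexLt at h1 h2
  refine Prod.ext ?_ ?_ <;> omega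

theorem pvLexLt_trans {a b c : Int × Int} (h1 : pvLexLt a b) (h2 : pvLexLt b c) : pvLexLt a c := by
  unfold pvLexLt at *; omega

-- the boolean "before" predicate that sorted2 with keys fst/snd uses
def pvBefore (a b : Int × Int) : Bool :=
  decide (a.1 < b.1) || (!decide (b.1 < a.1) && decide (a.2 < b.2))

theorem pvLexLe_of_not_before {a b : Int × Int} (h : pvBefore a b = false) : pvLexLe b a := by
  simp [pvBefore] at h
  unfold pvLexLe
  omega

theorem pv_insertBy_pairwise (x : Int × Int) (ys : List (Int × Int))
    (h : ys.Pairwise pvLexLe) :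
    (PySem.List.insertBy pvBefore x ys).Pairwise pvLexLe := by
  induction ys with
  | nil => simp [PySem.List.insertBy.eq_1]
  | cons y ys ih =>
    rw [PySem.List.insertBy.eq_2]
    rcases List.pairwise_cons.mp h with ⟨hy, hys⟩
    by_cases hb : pvBefore x y = true
    · simp only [hb, if_true]
      refine List.pairwise_cons.mpr ⟨?_, h⟩
      have hxy : pvLexLe x y := by
        simp [pvBefore] at hb
        unfold pvLexLe
        omega
      intro z hz
      rcases List.mem_cons.mp hz with rfl | hz
      · exact hxy
      · rcases hxy with h1 | ⟨h1, h1'⟩ <;> rcases hy z hz with h2 | ⟨h2, h2'⟩ <;>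
          unfold pvLexLe <;> omega
    · simp only [hb]
      refine List.pairwise_cons.mpr ⟨?_, ih hys⟩
      intro z hz
      rcases (PySem.List.insertBy_mem_iff pvBefore x z ys).mp hz with rfl | hz
      · exact pvLexLe_of_not_before (by simpa using hb)
      · exact hy z hz

theorem pv_sorted2_pairwise (xs : List (Int × Int)) :
    (PySem.List.sorted2 xs Prod.fst Prod.snd).Pairwise pvLexLe := by
  show (xs.foldl (fun acc x => PySem.List.insertBy _ x acc) []).Pairwise pvLexLe
  have : ∀ (l : List (Int × Int)) (acc : List (Int × Int)), acc.Pairwise pvLexLe →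
      (l.foldl (fun acc x => PySem.List.insertBy pvBefore x acc) acc).Pairwise pvLexLe := by
    intro l
    induction l with
    | nil => intro acc h; simpa using h
    | cons x l ih => intro acc h; exact ih _ (pv_insertBy_pairwise x acc h)
  exact this xs [] (by simp)

-- the flat multiset of normalized edges both programs generate
def pvFlat (faces : List (List Int)) : List (Int × Int) :=
  faces.flatMap (fun face => (PySem.List.pyRange 0 (face.length : Int) 1).map (pvEdge face))

-- A's nested set-building fold is set(pvFlat faces)
theorem pv_set_eq_ofList_flat (faces : List (List Int)) :
    ∀ (l : List (Int × Int)),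
    faces.foldl
      (fun edges face =>
        (PySem.List.pyRange 0 (face.length : Int) 1).foldl
          (fun edges i => PySem.Set.add edges (pvEdge face i)) edges) (PySem.Set.ofList l)
    = PySem.Set.ofList (l ++ pvFlat faces) := by
  induction faces with
  | nil => intro l; simp [pvFlat]
  | cons face faces ih =>
    intro l
    simp only [List.foldl_cons]
    rw [← PySem.Set.update_map_eq_foldl_add, ← PySem.Set.ofList_append, ih]
    simp [pvFlat]

-- merge union: the members are the union of the members
theorem pv_merge_mem (z : Int × Int) : ∀ (xs ys : List (Int × Int)),
    z ∈ pvMergeUnion xs ys ↔ z ∈ xs ∨ z ∈ ys := by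
  intro xs
  induction xs with
  | nil => intro ys; rw [pvMergeUnion.eq_1]; simp
  | cons x xs ihx =>
    intro ys
    induction ys with
    | nil => rw [pvMergeUnion.eq_2]; simp
    | cons y ys ihy =>
      rw [pvMergeUnion.eq_3]
      by_cases h1 : pvLtB x y = true
      · rw [if_pos h1]
        simp only [List.mem_cons, ihx (y :: ys), List.mem_cons]
        tauto
      · rw [if_neg h1]
        by_cases h2 : pvLtB y x = true
        · rw [if_pos h2]
          simp only [List.mem_cons, ihy, List.mem_cons]
          tauto
        · rw [if_neg h2]
          have hxy : x = y := pvLex_eq_of_not_lt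
            (fun h => h1 (pvLtB_iff.mpr h)) (fun h => h2 (pvLtB_iff.mpr h))
          subst hxy
          simp only [List.mem_cons, ihx ys]
          tauto

-- merge union keeps the list strictly increasing
theorem pv_merge_pairwise : ∀ (xs ys : List (Int × Int)),
    xs.Pairwise pvLexLt → ys.Pairwise pvLexLt → (pvMergeUnion xs ys).Pairwise pvLexLt := by
  intro xs
  induction xs with
  | nil => intro ys _ hy; rw [pvMergeUnion.eq_1]; exact hy
  | cons x xs ihx =>
    intro ys
    induction ys with
    | nil => intro hx _; rw [pvMergeUnion.eq_2]; exact hx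
    | cons y ys ihy =>
      intro hx hy
      rcases List.pairwise_cons.mp hx with ⟨hx1, hx2⟩
      rcases List.pairwise_cons.mp hy with ⟨hy1, hy2⟩
      rw [pvMergeUnion.eq_3]
      by_cases h1 : pvLtB x y = true
      · rw [if_pos h1]
        refine List.pairwise_cons.mpr ⟨?_, ihx (y :: ys) hx2 hy⟩
        intro z hz
        rcases (pv_merge_mem z xs (y :: ys)).mp hz with hz | hz
        · exact hx1 z hz
        · rcases List.mem_cons.mp hz with rfl | hz
          · exact pvLtB_iff.mp h1
          · exact pvLexLt_trans (pvLtB_iff.mp h1) (hy1 z hz)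
      · rw [if_neg h1]
        by_cases h2 : pvLtB y x = true
        · rw [if_pos h2]
          refine List.pairwise_cons.mpr ⟨?_, ihy hx hy2⟩
          intro z hz
          rcases (pv_merge_mem z (x :: xs) ys).mp hz with hz | hz
          · rcases List.mem_cons.mp hz with rfl | hz
            · exact pvLtB_iff.mp h2
            · exact pvLexLt_trans (pvLtB_iff.mp h2) (hx1 z hz)
          · exact hy1 z hz
        · rw [if_neg h2]
          have hxy : x = y := pvLex_eq_of_not_lt
            (fun h => h1 (pvLtB_iff.mpr h)) (fun h => h2 (pvLtB_iff.mpr h))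
          refine List.pairwise_cons.mpr ⟨?_, ihx ys hx2 hy2⟩
          intro z hz
          rcases (pv_merge_mem z xs ys).mp hz with hz | hz
          · exact hx1 z hz
          · exact hxy ▸ hy1 z hz

-- _union_all of strictly increasing runs: strictly increasing, members = union of runs
theorem pv_unionAll_spec : ∀ (n : Nat) (runs : List (List (Int × Int))), runs.length = n →
    (∀ r ∈ runs, r.Pairwise pvLexLt) →
    (pvUnionAll runs).Pairwise pvLexLt ∧
    (∀ z, z ∈ pvUnionAll runs ↔ ∃ r ∈ runs, z ∈ r) := by
  intro n
  induction n using Nat.strong_induction_on with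
  | _ n ih =>
    intro runs hlen hruns
    rw [pvUnionAll]
    by_cases h0 : runs.length = 0
    · rw [if_pos h0]
      rcases List.length_eq_zero_iff.mp h0 with rfl
      simp
    · rw [if_neg h0]
      by_cases h1 : runs.length = 1
      · rw [if_pos h1]
        rcases List.length_eq_one_iff.mp h1 with ⟨r, rfl⟩
        refine ⟨hruns r (by simp), fun z => ?_⟩
        simp [PySem.List.pyGetD]
      · rw [if_neg h1]
        simp only [pv_slice_take, pv_slice_drop]
        have htl : (runs.take (runs.length / 2)).length < n := by
          simp only [List.length_take]; omega
        have hdl : (runs.drop (runs.length / 2)).length < n := by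
          simp only [List.length_drop]; omega
        rcases ih _ htl (runs.take (runs.length / 2)) rfl
          (fun r hr => hruns r (List.mem_of_mem_take hr)) with ⟨hp1, hm1⟩
        rcases ih _ hdl (runs.drop (runs.length / 2)) rfl
          (fun r hr => hruns r (List.mem_of_mem_drop hr)) with ⟨hp2, hm2⟩
        refine ⟨pv_merge_pairwise _ _ hp1 hp2, fun z => ?_⟩
        rw [pv_merge_mem z, hm1 z, hm2 z]
        constructor
        · rintro (⟨r, hr, hz⟩ | ⟨r, hr, hz⟩)
          · exact ⟨r, List.mem_of_mem_take hr, hz⟩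
          · exact ⟨r, List.mem_of_mem_drop hr, hz⟩
        · rintro ⟨r, hr, hz⟩
          rw [← List.take_append_drop (runs.length / 2) runs] at hr
          rcases List.mem_append.mp hr with hr | hr
          · exact Or.inl ⟨r, hr, hz⟩
          · exact Or.inr ⟨r, hr, hz⟩

-- the run list B collects is the flat edge list, one singleton run per edge
theorem pv_runs_eq (faces : List (List Int)) :
    ∀ (acc : List (List (Int × Int))),
    faces.foldl
      (fun runs face =>
        (PySem.List.pyRange 0 (face.length : Int) 1).foldl
          (fun runs i => runs ++ [[pvEdge face i]]) runs) acc
    = acc ++ (pvFlat faces).map (fun e => [e]) := by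
  induction faces with
  | nil => intro acc; simp [pvFlat]
  | cons face faces ih =>
    intro acc
    simp only [List.foldl_cons]
    rw [PySem.List.foldl_append_singleton_eq_map (f := fun i => [pvEdge face i]), ih]
    simp [pvFlat, List.map_map]

-- B's result: strictly increasing, members = pvFlat
theorem pv_alt_spec (faces : List (List Int)) :
    (edges_from_faces_py_alt faces).Pairwise pvLexLt ∧
    (∀ z, z ∈ edges_from_faces_py_alt faces ↔ z ∈ pvFlat faces) := by
  unfold edges_from_faces_py_alt
  simp only []
  rw [pv_runs_eq faces []]
  simp only [List.nil_append]
  rcases pv_unionAll_spec ((pvFlat faces).map (fun e => [e])).length _ rfl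
    (by rintro r hr; rcases List.mem_map.mp hr with ⟨e, _, rfl⟩; simp) with ⟨h1, h2⟩
  refine ⟨h1, fun z => ?_⟩
  rw [h2 z]
  simp only [List.mem_map]
  constructor
  · rintro ⟨r, ⟨e, he, rfl⟩, hz⟩
    rcases List.mem_singleton.mp hz with rfl
    exact he
  · intro hz
    exact ⟨[z], ⟨z, hz, rfl⟩, by simp⟩

-- ===== VERDICT (by name: the statement is the Claim_ definition above) =====
theorem edges_from_faces_py_spec : Claim_equal_edges_from_faces_py := by
  intro faces _
  unfold Spec_edges_from_faces_py edges_from_faces_py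
  simp only []
  have hset : faces.foldl
      (fun edges face =>
        (PySem.List.pyRange 0 (face.length : Int) 1).foldl
          (fun edges i => PySem.Set.add edges (pvEdge face i)) edges) PySem.Set.empty
      = PySem.Set.ofList (pvFlat faces) := by
    have := pv_set_eq_ofList_flat faces []
    simpa using this
  rw [hset]
  rcases pv_alt_spec faces with ⟨hB_pair, hB_mem⟩
  have hA_pair : (PySem.List.sorted2 (PySem.Set.ofList (pvFlat faces)) Prod.fst Prod.snd).Pairwise pvLexLe :=
    pv_sorted2_pairwise _
  have hA_perm : (PySem.List.sorted2 (PySem.Set.ofList (pvFlat faces)) Prod.fst Prod.snd).Perm (PySem.Set.ofList (pvFlat faces)) :=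
    PySem.List.sorted2_perm _ _ _ _
  have hA_nodup : (PySem.List.sorted2 (PySem.Set.ofList (pvFlat faces)) Prod.fst Prod.snd).Nodup :=
    hA_perm.nodup_iff.mpr (PySem.Set.nodup_ofList _)
  have hB_nodup : (edges_from_faces_py_alt faces).Nodup :=
    hB_pair.imp (fun h => pvLexLt_ne h)
  have hperm : (PySem.List.sorted2 (PySem.Set.ofList (pvFlat faces)) Prod.fst Prod.snd).Perm
      (edges_from_faces_py_alt faces) := by
    rw [List.perm_ext_iff_of_nodup hA_nodup hB_nodup]
    intro z
    rw [hA_perm.mem_iff, hB_mem z]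
    simp [PySem.Set.mem_ofList]
  refine List.Perm.eq_of_pairwise ?_ hA_pair (hB_pair.imp pvLexLt_le) hperm
  intro a b _ _ hab hba
  rcases hab with h | ⟨h1, h2⟩ <;> rcases hba with h' | ⟨h1', h2'⟩ <;>
    [omega; omega; omega; exact Prod.ext h1 (le_antisymm h2 h2')]
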